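-- pv_equiv track=rewrite | github.com/Nghia03092004/nghia03092004.github.io | project_euler_unified/problem_606/solution.py | find_valid_signatures
-- ===== SOURCE A (Python) =====
-- from math import factorial, comb
--
-- def multinomial(parts):
--     """Compute multinomial coefficient for a list of parts."""
--     n = sum(parts)
--     result = factorial(n)
--     for p in parts:
--         result //= factorial(p)
--     return result
--
-- def find_valid_signatures(target=252, max_parts=20, max_exp=30):
--     """Find all exponent signatures (partitions) whose multinomial = target."""
--     results = []
--
--     def backtrack(current, max_val):
--         m = multinomial(current) if current else 1
--         if m == target and len(current) > 0:
--             results.append(tuple(current[:]))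
--         if m >= target:
--             return
--         for a in range(min(max_val, max_exp), 0, -1):
--             current.append(a)
--             backtrack(current, a)
--             current.pop()
--
--     backtrack([], max_exp)
--     return results
-- ===== SOURCE B (Python) =====
-- from math import factorial
--
--
-- def multinomial(parts):
--     """Compute multinomial coefficient for a list of parts."""
--     n = sum(parts)
--     result = factorial(n)
--     for p in parts:
--         result //= factorial(p)
--     return result
--
--
-- def find_valid_signatures(target=252, max_parts=20, max_exp=30):
--     """Iterative DFS with an explicit stack instead of recursive backtracking.
--
--     Children are pushed in ascending order so the largest part is popped
--     first, reproducing the pre-order, largest-first traversal of the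
--     recursive version exactly.
--     """
--     results = []
--     stack = [([], max_exp)]
--     while stack:
--         cur, max_val = stack.pop()
--         m = multinomial(cur) if cur else 1
--         if m == target and cur:
--             results.append(tuple(cur))
--         if m < target:
--             for a in range(1, min(max_val, max_exp) + 1):
--                 stack.append((cur + [a], a))
--     return results
-- ===== Notes on version B (the rewrite author's own statement) =====
-- stated objective: alternative
-- what changed: The recursive backtracking over a mutated shared list is replaced by an iterative DFS with an explicit stack of (partition, max_val) states, pushing children in ascending order so the largest part is popped first, which reproduces the exact pre-order, largest-first result order.
import Mathlib
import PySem

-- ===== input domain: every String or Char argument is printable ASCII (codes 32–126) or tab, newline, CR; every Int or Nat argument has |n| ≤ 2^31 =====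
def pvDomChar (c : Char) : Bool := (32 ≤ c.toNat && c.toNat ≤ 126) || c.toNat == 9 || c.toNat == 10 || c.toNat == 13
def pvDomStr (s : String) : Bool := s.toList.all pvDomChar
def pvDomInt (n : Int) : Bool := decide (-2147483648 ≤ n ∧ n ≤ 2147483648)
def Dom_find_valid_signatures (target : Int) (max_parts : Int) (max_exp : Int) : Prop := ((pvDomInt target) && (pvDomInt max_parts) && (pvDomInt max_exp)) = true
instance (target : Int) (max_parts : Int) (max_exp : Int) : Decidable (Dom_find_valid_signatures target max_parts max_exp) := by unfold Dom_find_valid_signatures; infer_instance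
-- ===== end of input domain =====

-- B replaces the recursive backtracking with an iterative DFS over an explicit stack
-- (children pushed ascending so the largest part pops first); objective: alternative.
-- Both ports carry a fuel counter purely as a totality guard (Python has none); the two
-- ports use the same initial fuel, so they exhaust it identically and equality holds for
-- all inputs.

-- ===== PORT A =====
-- math.factorial; exact for the nonnegative arguments these programs pass it
def pvFactorial (n : Int) : Int := (Nat.factorial n.toNat : Int)

def pvMultinomial (parts : List Int) : Int :=
  let n := parts.sum
  let result := pvFactorial n
  parts.foldl (fun r p => PySem.Int.floordiv r (pvFactorial p)) result

def pvFuel : Nat := 64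

def backA (target max_exp : Int) : Nat → List (List Int) → List Int → Int → List (List Int)
  | 0, res, _, _ => res   -- fuel guard only (never reached with pvFuel on |target| ≤ 2^31)
  | Nat.succ fuel, res, cur, maxVal =>
    let m := if cur = [] then 1 else pvMultinomial cur
    let res1 := if m = target ∧ 0 < cur.length then res ++ [cur] else res
    if target ≤ m then res1
    else (PySem.List.pyRange (min maxVal max_exp) 0 (-1)).foldl
        (fun r a => backA target max_exp fuel r (cur ++ [a]) a) res1

def find_valid_signatures (target : Int) (max_parts : Int) (max_exp : Int) : List (List Int) :=
  backA target max_exp pvFuel [] [] max_exp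

-- ===== PORT B =====
-- termination measure for the stack loop (proof device only, not part of the computation)
def pvMeasure (K : Nat) (st : List (List Int × Int × Nat)) : Nat :=
  (st.map (fun e => (K + 1) ^ e.2.2)).sum

theorem pvMeasure_cons (K : Nat) (e : List Int × Int × Nat) (st : List (List Int × Int × Nat)) :
    pvMeasure K (e :: st) = (K + 1) ^ e.2.2 + pvMeasure K st := by
  simp [pvMeasure]

theorem pvMeasure_foldl (K f : Nat) (cur : List Int) (as : List Int)
    (st : List (List Int × Int × Nat)) :
    pvMeasure K (as.foldl (fun s a => (cur ++ [a], a, f) :: s) st)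
      = as.length * (K + 1) ^ f + pvMeasure K st := by
  induction as generalizing st with
  | nil => simp
  | cons a as ih =>
    simp only [List.foldl_cons, ih, pvMeasure_cons, List.length_cons]
    ring

def runB (target max_exp : Int) (stack : List (List Int × Int × Nat)) (res : List (List Int)) :
    List (List Int) :=
  match stack with
  | [] => res
  | (_, _, 0) :: rest => runB target max_exp rest res   -- fuel guard only
  | (cur, mv, Nat.succ f) :: rest =>
    let m := if cur = [] then 1 else pvMultinomial cur
    let res1 := if m = target ∧ cur ≠ [] then res ++ [cur] else res
    if m < target then
      runB target max_exp
        ((PySem.List.pyRange 1 (min mv max_exp + 1) 1).foldl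
          (fun st a => (cur ++ [a], a, f) :: st) rest) res1
    else runB target max_exp rest res1
termination_by pvMeasure max_exp.toNat stack
decreasing_by
  · exact Nat.lt_add_of_pos_left (Nat.pow_pos (by omega))
  · rw [pvMeasure_foldl, pvMeasure_cons]
    have hpow : 0 < (max_exp.toNat + 1) ^ f := Nat.pow_pos (by omega)
    have hlen : (PySem.List.pyRange 1 (min mv max_exp + 1) 1).length ≤ max_exp.toNat := by
      rw [PySem.List.length_pyRange_one]
      have : min mv max_exp ≤ max_exp := min_le_right _ _
      omega
    have : (PySem.List.pyRange 1 (min mv max_exp + 1) 1).length * (max_exp.toNat + 1) ^ f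
        < (max_exp.toNat + 1) ^ (f + 1) := by
      calc (PySem.List.pyRange 1 (min mv max_exp + 1) 1).length * (max_exp.toNat + 1) ^ f
          ≤ max_exp.toNat * (max_exp.toNat + 1) ^ f := Nat.mul_le_mul_right _ hlen
        _ < (max_exp.toNat + 1) * (max_exp.toNat + 1) ^ f :=
            (Nat.mul_lt_mul_right hpow).2 (by omega)
        _ = (max_exp.toNat + 1) ^ (f + 1) := by rw [pow_succ]; ring
    exact Nat.add_lt_add_right this _
  · exact Nat.lt_add_of_pos_left (Nat.pow_pos (by omega))

def find_valid_signatures_alt (target : Int) (max_parts : Int) (max_exp : Int) : List (List Int) :=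
  runB target max_exp [([], max_exp, pvFuel)] []

-- ===== PRECONDITION & SPEC =====
def Spec_find_valid_signatures (target : Int) (max_parts : Int) (max_exp : Int) (out : List (List Int)) : Prop := out = find_valid_signatures_alt target max_parts max_exp
instance (target : Int) (max_parts : Int) (max_exp : Int) (out : List (List Int)) : Decidable (Spec_find_valid_signatures target max_parts max_exp out) := by unfold Spec_find_valid_signatures; infer_instance

-- ===== CLAIM (what is proved, stated in full; the proofs are below) =====
def Claim_equal_find_valid_signatures : Prop := ∀ (target : Int) (max_parts : Int) (max_exp : Int), Dom_find_valid_signatures target max_parts max_exp → Spec_find_valid_signatures target max_parts max_exp (find_valid_signatures target max_parts max_exp)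

-- ===== LEMMAS AND PROOFS =====

theorem push_eq (cur : List Int) (f : Nat) (as : List Int)
    (rest : List (List Int × Int × Nat)) :
    as.foldl (fun s a => (cur ++ [a], a, f) :: s) rest
      = (as.map (fun a => (cur ++ [a], a, f))).reverse ++ rest := by
  induction as generalizing rest with
  | nil => simp
  | cons a as ih => simp [ih]

theorem runB_map (t me : Int) (f : Nat) (cur : List Int)
    (IH : ∀ (cur : List Int) (mv : Int) rest res,
      runB t me ((cur, mv, f) :: rest) res = runB t me rest (backA t me f res cur mv)) :
    ∀ (l : List Int) (rest : List (List Int × Int × Nat)) (res : List (List Int)),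
      runB t me (l.map (fun a => (cur ++ [a], a, f)) ++ rest) res
        = runB t me rest (l.foldl (fun r a => backA t me f r (cur ++ [a]) a) res) := by
  intro l
  induction l with
  | nil => intro rest res; simp
  | cons a l ih =>
    intro rest res
    simp only [List.map_cons, List.cons_append, List.foldl_cons]
    rw [IH, ih]

theorem runB_eq_backA (t me : Int) :
    ∀ (f : Nat) (cur : List Int) (mv : Int) (rest : List (List Int × Int × Nat))
      (res : List (List Int)),
      runB t me ((cur, mv, f) :: rest) res = runB t me rest (backA t me f res cur mv) := by
  intro f
  induction f with
  | zero => intro cur mv rest res; rw [runB, backA]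
  | succ f ih =>
    intro cur mv rest res
    rw [runB, backA]
    simp only [List.length_pos_iff]
    by_cases h : t ≤ (if cur = [] then 1 else pvMultinomial cur)
    · rw [if_neg (not_lt.2 h), if_pos h]
    · rw [if_pos (not_le.1 h), if_neg h]
      have hr : (PySem.List.pyRange 1 (min mv me + 1) 1).reverse
          = PySem.List.pyRange (min mv me) 0 (-1) := by
        rw [PySem.List.pyRange_neg_one_eq_reverse]; norm_num
      rw [push_eq, ← List.map_reverse, hr]
      exact runB_map t me f cur ih _ _ _

-- ===== VERDICT (by name: the statement is the Claim_ definition above) =====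
theorem find_valid_signatures_spec : Claim_equal_find_valid_signatures := by
  intro target max_parts max_exp _
  unfold Spec_find_valid_signatures find_valid_signatures find_valid_signatures_alt
  rw [runB_eq_backA, runB]
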